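-- pv_equiv track=rewrite | github.com/sdfrew2/aoc | day22/cards.py | powerShuffle
-- ===== SOURCE A (Python) =====
-- def composeShuffle(m, s1, s2):
--     (a1, b1) = s1
--     (a2, b2) = s2
--     # (a1*x+b1)*a2 + b2 = a1*a2*x + b1*a2 + b2
--     ar = a1*a2 % m
--     br = (b1*a2 + b2) % m
--     return (ar, br)
--
-- def powerShuffle(m, s, n):
--     if n == 1:
--         return s
--     if n == 0:
--         return (1, 0)
--     half = powerShuffle(m, s, n // 2)
--     if n % 2 == 0:
--         return composeShuffle(m, half, half)
--     else:
--         return composeShuffle(m, composeShuffle(m, half, half), s)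
-- ===== SOURCE B (Python) =====
-- def composeAffine(m, s1, s2):
--     return (s1[0] * s2[0] % m, (s1[1] * s2[0] + s2[1]) % m)
--
-- def powerShuffle(m, s, n):
--     if n == 1:
--         return s
--     if n == 0:
--         return (1, 0)
--     result = (1, 0)
--     base = s
--     while n > 0:
--         if n % 2 == 1:
--             result = composeAffine(m, result, base)
--         base = composeAffine(m, base, base)
--         n //= 2
--     return result
-- ===== Notes on version B (the rewrite author's own statement) =====
-- stated objective: alternative
-- what changed: Replaces the top-down recursive halving (square the result of the recursive call on n//2, then maybe compose with s) by an iterative bottom-up binary-exponentiation loop that scans the bits of n from least significant upward, maintaining an accumulator and a repeatedly squared base; the n==0 and n==1 early returns are kept, as in A.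
import Mathlib
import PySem

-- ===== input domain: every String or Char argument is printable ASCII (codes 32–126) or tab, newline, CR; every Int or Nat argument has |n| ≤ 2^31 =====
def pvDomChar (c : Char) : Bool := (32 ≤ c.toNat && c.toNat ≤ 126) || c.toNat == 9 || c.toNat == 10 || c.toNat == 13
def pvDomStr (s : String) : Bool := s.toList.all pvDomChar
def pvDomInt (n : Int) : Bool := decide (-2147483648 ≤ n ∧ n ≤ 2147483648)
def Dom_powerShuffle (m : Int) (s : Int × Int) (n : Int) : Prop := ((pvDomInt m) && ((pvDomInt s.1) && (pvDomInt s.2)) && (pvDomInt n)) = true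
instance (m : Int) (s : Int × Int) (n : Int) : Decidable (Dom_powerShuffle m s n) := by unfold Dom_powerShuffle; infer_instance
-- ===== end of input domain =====

-- B rewrites the top-down recursive fast exponentiation as an iterative bottom-up
-- binary-exponentiation loop (objective: alternative decomposition, same O(log n) cost).

-- ===== PORT A =====
def composeShuffle (m : Int) (s1 s2 : Int × Int) : Int × Int :=
  let a1 := s1.1; let b1 := s1.2
  let a2 := s2.1; let b2 := s2.2
  let ar := PySem.Int.mod (a1 * a2) m
  let br := PySem.Int.mod (b1 * a2 + b2) m
  (ar, br)

def powerShuffle (m : Int) (s : Int × Int) (n : Int) : Int × Int :=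
  if n = 1 then s
  else if n = 0 then (1, 0)
  else if hgt : 1 < n then
    let half := powerShuffle m s (PySem.Int.floordiv n 2)
    if PySem.Int.mod n 2 = 0 then composeShuffle m half half
    else composeShuffle m (composeShuffle m half half) s
  else (1, 0)  -- n < 0: the Python recursion never terminates (RecursionError); excluded by Pre_
termination_by n.toNat
decreasing_by
  have := PySem.Int.floordiv_eq_ediv_of_pos (a := n) (b := 2) (by omega)
  omega

-- ===== PORT B =====
def composeAffine (m : Int) (s1 s2 : Int × Int) : Int × Int :=
  (PySem.Int.mod (s1.1 * s2.1) m, PySem.Int.mod (s1.2 * s2.1 + s2.2) m)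

def shuffleLoop (m : Int) (result base : Int × Int) (n : Int) : Int × Int :=
  if hpos : 0 < n then
    shuffleLoop m
      (if PySem.Int.mod n 2 = 1 then composeAffine m result base else result)
      (composeAffine m base base)
      (PySem.Int.floordiv n 2)
  else result
termination_by n.toNat
decreasing_by
  have := PySem.Int.floordiv_eq_ediv_of_pos (a := n) (b := 2) (by omega)
  omega

def powerShuffle_alt (m : Int) (s : Int × Int) (n : Int) : Int × Int :=
  if n = 1 then s
  else if n = 0 then (1, 0)
  else shuffleLoop m (1, 0) s n

-- ===== PRECONDITION & SPEC =====
-- Pre_ excludes exactly the inputs where Python A raises: n < 0 (RecursionError,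
-- n//2 never reaches 0) and m = 0 with n ≥ 2 (ZeroDivisionError in the '% m').
def Pre_powerShuffle (m : Int) (s : Int × Int) (n : Int) : Prop := 0 ≤ n ∧ (m ≠ 0 ∨ n ≤ 1)
instance (m : Int) (s : Int × Int) (n : Int) : Decidable (Pre_powerShuffle m s n) := by unfold Pre_powerShuffle; infer_instance
def pvWitness_powerShuffle : Int × (Int × Int) × Int := (10, (3, 4), 5)

def Spec_powerShuffle (m : Int) (s : Int × Int) (n : Int) (out : Int × Int) : Prop := out = powerShuffle_alt m s n
instance (m : Int) (s : Int × Int) (n : Int) (out : Int × Int) : Decidable (Spec_powerShuffle m s n out) := by unfold Spec_powerShuffle; infer_instance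

-- ===== CLAIM (what is proved, stated in full; the proofs are below) =====
def Claim_equal_powerShuffle : Prop := ∀ (m : Int) (s : Int × Int) (n : Int), Dom_powerShuffle m s n → Pre_powerShuffle m s n → Spec_powerShuffle m s n (powerShuffle m s n)

-- ===== LEMMAS AND PROOFS =====

-- exact (un-reduced) composition of affine maps, its powers, reduction mod m, congruence
def pvEC (x y : Int × Int) : Int × Int := (x.1 * y.1, x.2 * y.1 + y.2)

def pvPow (b : Int × Int) : Nat → Int × Int
  | 0 => (1, 0)
  | k + 1 => pvEC (pvPow b k) b

def pvRed (m : Int) (x : Int × Int) : Int × Int := (PySem.Int.mod x.1 m, PySem.Int.mod x.2 m)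

def pvCong (m : Int) (x y : Int × Int) : Prop := m ∣ x.1 - y.1 ∧ m ∣ x.2 - y.2

theorem pvModCongr (m a c : Int) (hm : m ≠ 0) (h : m ∣ a - c) : PySem.Int.mod a m = PySem.Int.mod c m := by
  have ha := PySem.Int.floordiv_mul_add_mod a m
  have hc := PySem.Int.floordiv_mul_add_mod c m
  obtain ⟨k, hk⟩ := h
  have hd : PySem.Int.mod a m - PySem.Int.mod c m = m * (k - (PySem.Int.floordiv a m - PySem.Int.floordiv c m)) := by ring_nf; nlinarith [ha, hc, hk]
  rcases lt_or_gt_of_ne hm with hneg | hpos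
  · have h1 := PySem.Int.mod_neg_bounds (a := a) (b := m) hneg
    have h2 := PySem.Int.mod_neg_bounds (a := c) (b := m) hneg
    have he1 : k - (PySem.Int.floordiv a m - PySem.Int.floordiv c m) < 1 := by nlinarith [h1.1, h1.2, h2.1, h2.2]
    have he2 : -1 < k - (PySem.Int.floordiv a m - PySem.Int.floordiv c m) := by nlinarith [h1.1, h1.2, h2.1, h2.2]
    have : k - (PySem.Int.floordiv a m - PySem.Int.floordiv c m) = 0 := by omega
    rw [this] at hd; omega
  · have h1a := PySem.Int.mod_nonneg (a := a) (b := m) hpos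
    have h1b := PySem.Int.mod_lt (a := a) (b := m) hpos
    have h2a := PySem.Int.mod_nonneg (a := c) (b := m) hpos
    have h2b := PySem.Int.mod_lt (a := c) (b := m) hpos
    have he1 : k - (PySem.Int.floordiv a m - PySem.Int.floordiv c m) < 1 := by nlinarith
    have he2 : -1 < k - (PySem.Int.floordiv a m - PySem.Int.floordiv c m) := by nlinarith
    have : k - (PySem.Int.floordiv a m - PySem.Int.floordiv c m) = 0 := by omega
    rw [this] at hd; omega

theorem pvCong_of_eq (m : Int) {x y : Int × Int} (h : x = y) : pvCong m x y := by
  subst h; exact ⟨by simp, by simp⟩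

theorem pvCong_trans {m : Int} {x y z : Int × Int} (h1 : pvCong m x y) (h2 : pvCong m y z) : pvCong m x z := by
  refine ⟨?_, ?_⟩
  · have := dvd_add h1.1 h2.1; simpa using this
  · have := dvd_add h1.2 h2.2; simpa using this

theorem pvCong_red (m : Int) (x : Int × Int) : pvCong m (pvRed m x) x := by
  refine ⟨⟨-(PySem.Int.floordiv x.1 m), ?_⟩, ⟨-(PySem.Int.floordiv x.2 m), ?_⟩⟩
  · have := PySem.Int.floordiv_mul_add_mod x.1 m; simp [pvRed]; linarith
  · have := PySem.Int.floordiv_mul_add_mod x.2 m; simp [pvRed]; linarith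

theorem pvCong_ec {m : Int} {x x' y y' : Int × Int} (hx : pvCong m x x') (hy : pvCong m y y') :
    pvCong m (pvEC x y) (pvEC x' y') := by
  obtain ⟨⟨p, hp⟩, ⟨q, hq⟩⟩ := hx
  obtain ⟨⟨u, hu⟩, ⟨v, hv⟩⟩ := hy
  refine ⟨⟨p * y.1 + x'.1 * u, ?_⟩, ⟨q * y.1 + x'.2 * u + v, ?_⟩⟩
  · simp only [pvEC]; linear_combination y.1 * hp + x'.1 * hu
  · simp only [pvEC]; linear_combination y.1 * hq + x'.2 * hu + hv

theorem pvCong_pow {m : Int} {b b' : Int × Int} (h : pvCong m b b') (k : Nat) :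
    pvCong m (pvPow b k) (pvPow b' k) := by
  induction k with
  | zero => exact pvCong_of_eq m rfl
  | succ k ih => exact pvCong_ec ih h

theorem pvRed_eq_of_cong {m : Int} (hm : m ≠ 0) {x y : Int × Int} (h : pvCong m x y) :
    pvRed m x = pvRed m y := by
  simp only [pvRed, Prod.mk.injEq]
  exact ⟨pvModCongr m x.1 y.1 hm h.1, pvModCongr m x.2 y.2 hm h.2⟩

theorem pvEC_assoc (x y z : Int × Int) : pvEC (pvEC x y) z = pvEC x (pvEC y z) := by
  simp only [pvEC, Prod.mk.injEq]; constructor <;> ring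

theorem pvEC_id_left (y : Int × Int) : pvEC (1, 0) y = y := by
  simp [pvEC]

theorem pvEC_id_right (x : Int × Int) : pvEC x (1, 0) = x := by
  simp [pvEC]

theorem pvPow_one (b : Int × Int) : pvPow b 1 = b := by
  simp [pvPow, pvEC_id_left]

theorem pvPow_add (b : Int × Int) (i j : Nat) : pvPow b (i + j) = pvEC (pvPow b i) (pvPow b j) := by
  induction j with
  | zero => simp [pvPow, pvEC_id_right]
  | succ j ih =>
    show pvEC (pvPow b (i + j)) b = pvEC (pvPow b i) (pvEC (pvPow b j) b)
    rw [ih, pvEC_assoc]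

theorem pvPow_double (b : Int × Int) (j : Nat) : pvPow (pvEC b b) j = pvPow b (2 * j) := by
  induction j with
  | zero => rfl
  | succ j ih =>
    have h2 : 2 * (j + 1) = (2 * j + 1) + 1 := by ring
    show pvEC (pvPow (pvEC b b) j) (pvEC b b) = pvPow b (2 * (j + 1))
    rw [ih, h2]
    show pvEC (pvPow b (2 * j)) (pvEC b b) = pvEC (pvEC (pvPow b (2 * j)) b) b
    rw [pvEC_assoc]

theorem composeShuffle_eq (m : Int) (x y : Int × Int) : composeShuffle m x y = pvRed m (pvEC x y) := rfl

theorem composeAffine_eq (m : Int) (x y : Int × Int) : composeAffine m x y = pvRed m (pvEC x y) := rfl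

-- A for n ≥ 2 computes the reduced n-th power
theorem powerShuffle_eq_red (m : Int) (s : Int × Int) (hm : m ≠ 0) :
    ∀ k : Nat, 2 ≤ k → powerShuffle m s (k : Int) = pvRed m (pvPow s k) := by
  intro k
  induction k using Nat.strong_induction_on with
  | _ k ih =>
    intro hk
    have hne1 : (k : Int) ≠ 1 := by omega
    have hne0 : (k : Int) ≠ 0 := by omega
    have hgt : (1 : Int) < (k : Int) := by omega
    have hdiv : PySem.Int.floordiv (k : Int) 2 = ((k / 2 : Nat) : Int) := by
      exact_mod_cast PySem.Int.floordiv_natCast k 2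
    have hmod : PySem.Int.mod (k : Int) 2 = ((k % 2 : Nat) : Int) := by
      exact_mod_cast PySem.Int.mod_natCast k 2
    rw [powerShuffle]
    simp only [hne1, hne0, hgt, if_false, dif_pos, hdiv, hmod]
    set j := k / 2 with hj
    have hj1 : 1 ≤ j := by omega
    have hcong : pvCong m (powerShuffle m s ((j : Nat) : Int)) (pvPow s j) := by
      rcases Nat.lt_or_ge j 2 with hj2 | hj2
      · have : j = 1 := by omega
        rw [this]
        have h1 : powerShuffle m s ((1 : Nat) : Int) = s := by rw [powerShuffle]; norm_num
        rw [h1, pvPow_one]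
        exact pvCong_of_eq m rfl
      · rw [ih j (by omega) hj2]
        exact pvCong_red m (pvPow s j)
    by_cases hpar : ((k % 2 : Nat) : Int) = 0
    · have hk2 : k = j + j := by omega
      simp only [hpar, if_pos, composeShuffle_eq]
      refine pvRed_eq_of_cong hm ?_
      refine pvCong_trans (pvCong_ec hcong hcong) (pvCong_of_eq m ?_)
      rw [hk2, pvPow_add]
    · have hk2 : k = (j + j) + 1 := by omega
      simp only [hpar, if_false, composeShuffle_eq]
      refine pvRed_eq_of_cong hm ?_
      have h1 : pvCong m (pvEC (pvRed m (pvEC (powerShuffle m s ((j : Nat) : Int)) (powerShuffle m s ((j : Nat) : Int)))) s)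
          (pvEC (pvEC (pvPow s j) (pvPow s j)) (pvPow s 1)) := by
        refine pvCong_ec (pvCong_trans (pvCong_red m _) (pvCong_ec hcong hcong)) ?_
        rw [pvPow_one]; exact pvCong_of_eq m rfl
      refine pvCong_trans h1 (pvCong_of_eq m ?_)
      rw [hk2, pvPow_add, pvPow_add]

-- B's loop invariant
theorem shuffleLoop_eq_red (m : Int) (hm : m ≠ 0) :
    ∀ k : Nat, 1 ≤ k → ∀ r b : Int × Int, shuffleLoop m r b (k : Int) = pvRed m (pvEC r (pvPow b k)) := by
  intro k
  induction k using Nat.strong_induction_on with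
  | _ k ih =>
    intro hk r b
    have hpos : (0 : Int) < (k : Int) := by omega
    have hdiv : PySem.Int.floordiv (k : Int) 2 = ((k / 2 : Nat) : Int) := by
      exact_mod_cast PySem.Int.floordiv_natCast k 2
    have hmod : PySem.Int.mod (k : Int) 2 = ((k % 2 : Nat) : Int) := by
      exact_mod_cast PySem.Int.mod_natCast k 2
    rw [shuffleLoop]
    simp only [hpos, dif_pos, hdiv, hmod]
    set j := k / 2 with hj
    rcases Nat.lt_or_ge k 2 with hk2 | hk2
    · -- k = 1
      have hk1 : k = 1 := by omega
      have hj0 : j = 0 := by omega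
      have hm1 : ((k % 2 : Nat) : Int) = 1 := by omega
      rw [hj0]
      have hstop : ∀ r', shuffleLoop m r' (composeAffine m b b) ((0 : Nat) : Int) = r' := by
        intro r'; rw [shuffleLoop]; norm_num
      rw [hstop, if_pos hm1, hk1, pvPow_one, composeAffine_eq]
    · have hj1 : 1 ≤ j := by omega
      rw [ih j (by omega) hj1]
      refine pvRed_eq_of_cong hm ?_
      have hb : pvCong m (composeAffine m b b) (pvEC b b) := by
        rw [composeAffine_eq]; exact pvCong_red m _
      have hbp : pvCong m (pvPow (composeAffine m b b) j) (pvPow b (2 * j)) := by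
        refine pvCong_trans (pvCong_pow hb j) (pvCong_of_eq m (pvPow_double b j))
      have hr : pvCong m (if ((k % 2 : Nat) : Int) = 1 then composeAffine m r b else r)
          (pvEC r (pvPow b (k % 2))) := by
        by_cases hp : ((k % 2 : Nat) : Int) = 1
        · have : k % 2 = 1 := by omega
          rw [if_pos hp, this, pvPow_one, composeAffine_eq]
          exact pvCong_red m _
        · have : k % 2 = 0 := by omega
          rw [if_neg hp, this]
          exact pvCong_of_eq m (by rw [pvPow, pvEC_id_right])
      refine pvCong_trans (pvCong_ec hr hbp) (pvCong_of_eq m ?_)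
      have hsum : k % 2 + 2 * j = k := by omega
      rw [pvEC_assoc, ← pvPow_add, hsum]

-- ===== VERDICT (by name: the statement is the Claim_ definition above) =====
theorem powerShuffle_spec : Claim_equal_powerShuffle := by
  unfold Claim_equal_powerShuffle
  intro m s n _ hpre
  unfold Spec_powerShuffle
  obtain ⟨hn, hm⟩ := hpre
  rcases Int.lt_or_le n 2 with hlt | hge
  · -- n = 0 or n = 1
    interval_cases n <;> simp [powerShuffle, powerShuffle_alt]
  · have hm0 : m ≠ 0 := by rcases hm with h | h; exact h; omega
    obtain ⟨k, rfl⟩ : ∃ k : Nat, n = (k : Int) := ⟨n.toNat, by omega⟩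
    have hk : 2 ≤ k := by exact_mod_cast hge
    have hA := powerShuffle_eq_red m s hm0 k hk
    have hB := shuffleLoop_eq_red m hm0 k (by omega) (1, 0) s
    have hne1 : (k : Int) ≠ 1 := by omega
    have hne0 : (k : Int) ≠ 0 := by omega
    rw [hA]
    unfold powerShuffle_alt
    rw [if_neg hne1, if_neg hne0, hB, pvEC_id_left]
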